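-- pv_equiv track=rewrite | github.com/almargolis/quickdev | qdcore/src/qdcore/utils.py | InnercapSplit
-- ===== SOURCE A (Python) =====
-- NUMBERS = "0123456789"
--
-- LOWERCASELETTERS = "abcdefghijklmnopqrstuvwxyz"
--
-- UPPERCASELETTERS = "ABCDEFGHIJKLMNOPQRSTUVWXYZ"
--
-- def InnercapSplit(parmText):
--     wsResult = []
--     if isinstance(parmText, str):
--         wsBlankStr = ""
--     else:
--         wsBlankStr = ""
--     wsThisSymbol = wsBlankStr
--     wsLastWasLetter = False
--     wsLastWasUpper = False
--     wsLastWasNumber = False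
--     for wsThis in parmText:
--         wsIsDelim = False
--         wsKeep = True
--         if wsThis in LOWERCASELETTERS:
--             if not wsLastWasLetter:
--                 if (wsThis == "d") and (wsThisSymbol in ["2", "3"]):
--                     pass  # keep 2d / 3d as idiom
--                 else:
--                     wsIsDelim = True
--             wsKeep = True
--             wsLastWasLetter = True
--             wsLastWasUpper = False
--             wsLastWasNumber = False
--         elif wsThis in UPPERCASELETTERS:
--             if not wsLastWasUpper:  # This is an innercap
--                 if (wsThis == "D") and (wsThisSymbol in ["2", "3"]):
--                     pass  # keep 2D / 3D as idiom
--                 else: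
--                     wsIsDelim = True
--             wsKeep = True
--             wsLastWasLetter = True
--             wsLastWasUpper = True
--             wsLastWasNumber = False
--         elif wsThis in NUMBERS:
--             if not wsLastWasNumber:
--                 wsIsDelim = True
--             wsKeep = True
--             wsLastWasLetter = False
--             wsLastWasUpper = False
--             wsLastWasNumber = True
--         else:
--             # This will be underscore, dash, white space or lots of other
--             # things
--             wsIsDelim = True
--             wsKeep = False
--             wsLastWasLetter = False
--             wsLastWasUpper = False
--             wsLastWasNumber = False
--         if wsIsDelim:
--             if wsThisSymbol != wsBlankStr:
--                 wsResult.append(wsThisSymbol)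
--                 wsThisSymbol = wsBlankStr
--         if wsKeep:
--             wsThisSymbol += wsThis
--     #
--     if wsThisSymbol != wsBlankStr:
--         wsResult.append(wsThisSymbol)
--     return wsResult
-- ===== SOURCE B (Python) =====
-- def InnercapSplit(parmText):
--     # Maximal-munch tokenizer: consume one whole token (or skip one separator)
--     # per outer step, instead of a per-character flag state machine.
--     out = []
--     i, n = 0, len(parmText)
--     while i < n:
--         c = parmText[i]
--         if "0" <= c <= "9":
--             j = i + 1
--             if c in "23" and j < n and parmText[j] == "d":
--                 j += 1
--                 while j < n and "a" <= parmText[j] <= "z":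
--                     j += 1
--             elif c in "23" and j < n and parmText[j] == "D":
--                 j += 1
--                 while j < n and "A" <= parmText[j] <= "Z":
--                     j += 1
--                 while j < n and "a" <= parmText[j] <= "z":
--                     j += 1
--             else:
--                 while j < n and "0" <= parmText[j] <= "9":
--                     j += 1
--             out.append(parmText[i:j])
--             i = j
--         elif "A" <= c <= "Z":
--             j = i + 1
--             while j < n and "A" <= parmText[j] <= "Z":
--                 j += 1
--             while j < n and "a" <= parmText[j] <= "z":
--                 j += 1
--             out.append(parmText[i:j])
--             i = j
--         elif "a" <= c <= "z":
--             j = i + 1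
--             while j < n and "a" <= parmText[j] <= "z":
--                 j += 1
--             out.append(parmText[i:j])
--             i = j
--         else:
--             i += 1
--     return out
-- ===== Notes on version B (the rewrite author's own statement) =====
-- stated objective: simpler
-- what changed: Replaced A's per-character state machine (five loop-carried variables: result, current symbol, three lastWas* flags) with a maximal-munch tokenizer that consumes one whole token (idiom 2d/3D, digit run, Upper+lower run, lower run) or skips one separator per outer step, slicing tokens directly out of the input.
import Mathlib
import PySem

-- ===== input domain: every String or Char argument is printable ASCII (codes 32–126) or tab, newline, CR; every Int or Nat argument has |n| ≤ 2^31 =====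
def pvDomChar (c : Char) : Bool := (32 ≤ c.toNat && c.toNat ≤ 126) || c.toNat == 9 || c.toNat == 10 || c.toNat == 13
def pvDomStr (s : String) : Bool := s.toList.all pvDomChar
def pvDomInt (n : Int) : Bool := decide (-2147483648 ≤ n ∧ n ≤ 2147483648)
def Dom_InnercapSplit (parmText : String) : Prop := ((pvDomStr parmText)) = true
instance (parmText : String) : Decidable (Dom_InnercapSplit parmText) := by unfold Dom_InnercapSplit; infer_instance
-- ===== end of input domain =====

-- B re-implements A's per-character flag state machine as a maximal-munch
-- token scanner (one whole token consumed per outer step); objective: simpler.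

-- shared ASCII character classifiers (exact for the string-literal membership
-- tests of A and the range comparisons of B)
def icLower (c : Char) : Bool := decide ('a' ≤ c ∧ c ≤ 'z')
def icUpper (c : Char) : Bool := decide ('A' ≤ c ∧ c ≤ 'Z')
def icDigit (c : Char) : Bool := decide ('0' ≤ c ∧ c ≤ '9')

-- ===== PORT A =====
-- one iteration of A's for-loop over (wsResult, wsThisSymbol, wsLastWasLetter, wsLastWasUpper, wsLastWasNumber)
def icStep (st : List (List Char) × List Char × Bool × Bool × Bool) (c : Char) :
    List (List Char) × List Char × Bool × Bool × Bool :=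
  match st with
  | (res, sym, ll, lu, ln) =>
    let t : Bool × Bool × Bool × Bool × Bool :=
      if icLower c then
        ((if ll then false else if c = 'd' ∧ (sym = ['2'] ∨ sym = ['3']) then false else true),
          true, true, false, false)
      else if icUpper c then
        ((if lu then false else if c = 'D' ∧ (sym = ['2'] ∨ sym = ['3']) then false else true),
          true, true, true, false)
      else if icDigit c then
        ((if ln then false else true), true, false, false, true)
      else
        (true, false, false, false, false)
    match t with
    | (isDelim, keep, ll', lu', ln') =>
      let p : List (List Char) × List Char :=
        if isDelim ∧ sym ≠ [] then (res ++ [sym], []) else (res, sym)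
      match p with
      | (res1, sym1) =>
        let sym2 := if keep then sym1 ++ [c] else sym1
        (res1, sym2, ll', lu', ln')

-- the final flush after the loop
def icFlush (st : List (List Char) × List Char × Bool × Bool × Bool) : List (List Char) :=
  match st with
  | (res, sym, _, _, _) => if sym ≠ [] then res ++ [sym] else res

def InnercapSplit (parmText : String) : List String :=
  (icFlush (parmText.toList.foldl icStep ([], [], false, false, false))).map (fun t => String.ofList t)

-- ===== PORT B =====
-- maximal-munch scanner: one token (or one skipped separator) per step
def icScan : List Char → List (List Char)
  | [] => []
  | c :: r =>
    if icDigit c then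
      if (c = '2' ∨ c = '3') ∧ r.head? = some 'd' then
        (c :: 'd' :: r.tail.takeWhile icLower) :: icScan (r.tail.dropWhile icLower)
      else if (c = '2' ∨ c = '3') ∧ r.head? = some 'D' then
        (c :: 'D' :: (r.tail.takeWhile icUpper ++
            (r.tail.dropWhile icUpper).takeWhile icLower)) ::
          icScan ((r.tail.dropWhile icUpper).dropWhile icLower)
      else
        (c :: r.takeWhile icDigit) :: icScan (r.dropWhile icDigit)
    else if icUpper c then
      (c :: (r.takeWhile icUpper ++ (r.dropWhile icUpper).takeWhile icLower)) ::
        icScan ((r.dropWhile icUpper).dropWhile icLower)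
    else if icLower c then
      (c :: r.takeWhile icLower) :: icScan (r.dropWhile icLower)
    else
      icScan r
  termination_by l => l.length
  decreasing_by
  · simp
    exact (List.length_dropWhile_le _ _).trans (by cases r <;> simp)
  · simp
    exact ((List.length_dropWhile_le _ _).trans (List.length_dropWhile_le _ _)).trans (by cases r <;> simp)
  · simp
    exact List.length_dropWhile_le _ _
  · simp
    exact (List.length_dropWhile_le _ _).trans (List.length_dropWhile_le _ _)
  · simp
    exact List.length_dropWhile_le _ _
  · simp

def InnercapSplit_alt (parmText : String) : List String :=
  (icScan parmText.toList).map (fun t => String.ofList t)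

-- ===== PRECONDITION & SPEC =====
def Spec_InnercapSplit (parmText : String) (out : List String) : Prop := out = InnercapSplit_alt parmText
instance (parmText : String) (out : List String) : Decidable (Spec_InnercapSplit parmText out) := by unfold Spec_InnercapSplit; infer_instance

-- ===== CLAIM (what is proved, stated in full; the proofs are below) =====
def Claim_equal_InnercapSplit : Prop := ∀ (parmText : String), Dom_InnercapSplit parmText → Spec_InnercapSplit parmText (InnercapSplit parmText)

-- ===== LEMMAS AND PROOFS =====

def icRun (st : List (List Char) × List Char × Bool × Bool × Bool) (l : List Char) :
    List (List Char) := icFlush (l.foldl icStep st)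

theorem icRun_cons (st : List (List Char) × List Char × Bool × Bool × Bool) (c : Char)
    (l : List Char) : icRun st (c :: l) = icRun (icStep st c) l := rfl

-- character-class disjointness facts
theorem not_lower_of_digit (c : Char) (h : icDigit c = true) : icLower c = false := by
  simp [icDigit] at h
  simp [icLower]
  intro ha
  exact absurd (le_trans ha h.2) (by decide)

theorem not_upper_of_digit (c : Char) (h : icDigit c = true) : icUpper c = false := by
  simp [icDigit] at h
  simp [icUpper]
  intro ha
  exact absurd (le_trans ha h.2) (by decide)

theorem not_lower_of_upper (c : Char) (h : icUpper c = true) : icLower c = false := by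
  simp [icUpper] at h
  simp [icLower]
  intro ha
  exact absurd (le_trans ha h.2) (by decide)

-- one-step restart: leaving a letter-token state is the same as starting fresh
theorem step_exit_letter (res : List (List Char)) (sym : List Char) (lu : Bool) (c : Char)
    (hnl : icLower c = false) (hu : lu = true → icUpper c = false)
    (hs : sym ≠ []) (h2 : sym ≠ ['2']) (h3 : sym ≠ ['3']) :
    icStep (res, sym, true, lu, false) c = icStep (res ++ [sym], [], false, false, false) c := by
  by_cases hup : icUpper c = true
  · have hlu : lu = false := by
      cases lu
      · rfl
      · exact absurd hup (by simp [hu rfl])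
    subst hlu
    have hni : ¬(c = 'D' ∧ (sym = ['2'] ∨ sym = ['3'])) := by
      rintro ⟨-, h | h⟩ <;> simp_all
    simp [icStep, hnl, hup, hni, hs]
  · by_cases hd : icDigit c = true
    · simp [icStep, hnl, hup, hd, hs]
    · simp [icStep, hnl, hup, hd, hs]

theorem step_exit_num (res : List (List Char)) (sym : List Char) (c : Char)
    (hnd : icDigit c = false) (hs : sym ≠ [])
    (hid : ¬((sym = ['2'] ∨ sym = ['3']) ∧ (c = 'd' ∨ c = 'D'))) :
    icStep (res, sym, false, false, true) c = icStep (res ++ [sym], [], false, false, false) c := by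
  by_cases hl : icLower c = true
  · have hni : ¬(c = 'd' ∧ (sym = ['2'] ∨ sym = ['3'])) := by
      rintro ⟨hc, hsy⟩
      exact hid ⟨hsy, Or.inl hc⟩
    simp [icStep, hl, hni, hs]
  · by_cases hup : icUpper c = true
    · have hni : ¬(c = 'D' ∧ (sym = ['2'] ∨ sym = ['3'])) := by
        rintro ⟨hc, hsy⟩
        exact hid ⟨hsy, Or.inr hc⟩
      simp [icStep, hl, hup, hni, hs]
    · simp [icStep, hl, hup, hnd, hs]

theorem run_lower (l : List Char) : ∀ (res : List (List Char)) (sym : List Char),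
    sym ≠ [] → sym ≠ ['2'] → sym ≠ ['3'] →
    icRun (res, sym, true, false, false) l =
      icRun (res ++ [sym ++ l.takeWhile icLower], [], false, false, false) (l.dropWhile icLower) := by
  induction l with
  | nil =>
    intro res sym hs _ _
    simp [icRun, icFlush, hs]
  | cons c r ih =>
    intro res sym hs h2 h3
    by_cases hl : icLower c = true
    · rw [List.takeWhile_cons_of_pos hl, List.dropWhile_cons_of_pos hl, icRun_cons]
      have hstep : icStep (res, sym, true, false, false) c = (res, sym ++ [c], true, false, false) := by
        simp [icStep, hl]
      rw [hstep, ih res (sym ++ [c]) (by simp) (by cases sym <;> simp_all) (by cases sym <;> simp_all)]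
      simp
    · rw [List.takeWhile_cons_of_neg (by simp [hl]), List.dropWhile_cons_of_neg (by simp [hl]),
        icRun_cons, step_exit_letter res sym false c (by simp [hl]) (by simp) hs h2 h3, ← icRun_cons]
      simp

theorem run_upper (l : List Char) : ∀ (res : List (List Char)) (sym : List Char),
    sym ≠ [] → sym ≠ ['2'] → sym ≠ ['3'] →
    icRun (res, sym, true, true, false) l =
      icRun (res ++ [sym ++ l.takeWhile icUpper ++ (l.dropWhile icUpper).takeWhile icLower],
        [], false, false, false) ((l.dropWhile icUpper).dropWhile icLower) := by
  induction l with
  | nil =>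
    intro res sym hs _ _
    simp [icRun, icFlush, hs]
  | cons c r ih =>
    intro res sym hs h2 h3
    by_cases hup : icUpper c = true
    · rw [List.takeWhile_cons_of_pos hup, List.dropWhile_cons_of_pos hup, icRun_cons]
      have hstep : icStep (res, sym, true, true, false) c = (res, sym ++ [c], true, true, false) := by
        simp [icStep, not_lower_of_upper c hup, hup]
      rw [hstep, ih res (sym ++ [c]) (by simp) (by cases sym <;> simp_all) (by cases sym <;> simp_all)]
      simp
    · rw [List.takeWhile_cons_of_neg (by simp [hup]), List.dropWhile_cons_of_neg (by simp [hup])]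
      by_cases hl : icLower c = true
      · rw [List.takeWhile_cons_of_pos hl, List.dropWhile_cons_of_pos hl, icRun_cons]
        have hstep : icStep (res, sym, true, true, false) c = (res, sym ++ [c], true, false, false) := by
          simp [icStep, hl]
        rw [hstep, run_lower r res (sym ++ [c]) (by simp) (by cases sym <;> simp_all)
          (by cases sym <;> simp_all)]
        simp
      · rw [List.takeWhile_cons_of_neg (by simp [hl]), List.dropWhile_cons_of_neg (by simp [hl]),
          icRun_cons, step_exit_letter res sym true c (by simp [hl]) (fun _ => by simp [hup]) hs h2 h3,
          ← icRun_cons]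
        simp

theorem run_num (l : List Char) : ∀ (res : List (List Char)) (sym : List Char),
    sym ≠ [] →
    ¬((sym = ['2'] ∨ sym = ['3']) ∧ (l.head? = some 'd' ∨ l.head? = some 'D')) →
    icRun (res, sym, false, false, true) l =
      icRun (res ++ [sym ++ l.takeWhile icDigit], [], false, false, false) (l.dropWhile icDigit) := by
  induction l with
  | nil =>
    intro res sym hs _
    simp [icRun, icFlush, hs]
  | cons c r ih =>
    intro res sym hs hid
    by_cases hd : icDigit c = true
    · rw [List.takeWhile_cons_of_pos hd, List.dropWhile_cons_of_pos hd, icRun_cons]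
      have hstep : icStep (res, sym, false, false, true) c = (res, sym ++ [c], false, false, true) := by
        simp [icStep, not_lower_of_digit c hd, not_upper_of_digit c hd, hd]
      rw [hstep, ih res (sym ++ [c]) (by simp) (by
        rintro ⟨h | h, -⟩ <;> · cases sym <;> simp_all)]
      simp
    · rw [List.takeWhile_cons_of_neg (by simp [hd]), List.dropWhile_cons_of_neg (by simp [hd]),
        icRun_cons, step_exit_num res sym c (by simp [hd]) hs (by
          rintro ⟨hsy, hc⟩
          exact hid ⟨hsy, by rcases hc with h | h <;> simp [h]⟩), ← icRun_cons]
      simp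

-- fresh-state single steps
theorem fresh_lower (res : List (List Char)) (c : Char) (h : icLower c = true) :
    icStep (res, [], false, false, false) c = (res, [c], true, false, false) := by
  simp [icStep, h]

theorem fresh_upper (res : List (List Char)) (c : Char) (h : icUpper c = true) :
    icStep (res, [], false, false, false) c = (res, [c], true, true, false) := by
  simp [icStep, not_lower_of_upper c h, h]

theorem fresh_digit (res : List (List Char)) (c : Char) (h : icDigit c = true) :
    icStep (res, [], false, false, false) c = (res, [c], false, false, true) := by
  simp [icStep, not_lower_of_digit c h, not_upper_of_digit c h, h]

theorem fresh_other (res : List (List Char)) (c : Char) (hl : icLower c = false)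
    (hu : icUpper c = false) (hd : icDigit c = false) :
    icStep (res, [], false, false, false) c = (res, [], false, false, false) := by
  simp [icStep, hl, hu, hd]

theorem upper_ne_23 (c : Char) (h : icUpper c = true) : c ≠ '2' ∧ c ≠ '3' := by
  constructor <;> · rintro rfl; simp [icUpper] at h

theorem lower_ne_23 (c : Char) (h : icLower c = true) : c ≠ '2' ∧ c ≠ '3' := by
  constructor <;> · rintro rfl; simp [icLower] at h

theorem run_main : ∀ (n : ℕ) (l : List Char), l.length ≤ n → ∀ (res : List (List Char)),
    icRun (res, [], false, false, false) l = res ++ icScan l := by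
  intro n
  induction n with
  | zero =>
    intro l hl res
    have : l = [] := List.eq_nil_of_length_eq_zero (Nat.le_zero.mp hl)
    subst this
    simp [icRun, icFlush, icScan]
  | succ n ih =>
    intro l hl res
    cases l with
    | nil => simp [icRun, icFlush, icScan]
    | cons c r =>
      have hr : r.length ≤ n := by simpa using hl
      by_cases hd : icDigit c = true
      · rw [icRun_cons, fresh_digit res c hd]
        by_cases h2d : (c = '2' ∨ c = '3') ∧ r.head? = some 'd'
        · obtain ⟨hc, hh⟩ := h2d
          cases r with
          | nil => simp at hh
          | cons d r2 =>
            have hd' : d = 'd' := by simpa using hh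
            subst hd'
            have hr2 : r2.length ≤ n := by simp at hr; omega
            have hstep : icStep (res, [c], false, false, true) 'd' = (res, [c, 'd'], true, false, false) := by
              rcases hc with rfl | rfl <;> simp [icStep, show icLower 'd' = true from by decide]
            have hscan : icScan (c :: 'd' :: r2) =
                (c :: 'd' :: r2.takeWhile icLower) :: icScan (r2.dropWhile icLower) := by
              rw [icScan]
              simp [hd, hc]
            rw [icRun_cons, hstep, run_lower r2 res [c, 'd'] (by simp) (by simp) (by simp),
              ih _ (le_trans (List.length_dropWhile_le _ _) hr2) _, hscan]
            simp
        · by_cases h2D : (c = '2' ∨ c = '3') ∧ r.head? = some 'D'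
          · obtain ⟨hc, hh⟩ := h2D
            cases r with
            | nil => simp at hh
            | cons d r2 =>
              have hd' : d = 'D' := by simpa using hh
              subst hd'
              have hr2 : r2.length ≤ n := by simp at hr; omega
              have hstep : icStep (res, [c], false, false, true) 'D' = (res, [c, 'D'], true, true, false) := by
                rcases hc with rfl | rfl <;> simp [icStep, show icLower 'D' = false from by decide,
                  show icUpper 'D' = true from by decide]
              have hscan : icScan (c :: 'D' :: r2) =
                  (c :: 'D' :: (r2.takeWhile icUpper ++ (r2.dropWhile icUpper).takeWhile icLower)) ::
                    icScan ((r2.dropWhile icUpper).dropWhile icLower) := by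
                rw [icScan]
                simp [hd, hc]
              rw [icRun_cons, hstep, run_upper r2 res [c, 'D'] (by simp) (by simp) (by simp),
                ih _ (le_trans (List.length_dropWhile_le _ _)
                  (le_trans (List.length_dropWhile_le _ _) hr2)) _, hscan]
              simp
          · rw [run_num r res [c] (by simp) (by
                rintro ⟨hsy, hh⟩
                have hc : c = '2' ∨ c = '3' := by rcases hsy with h | h <;> simp_all
                rcases hh with h | h
                · exact h2d ⟨hc, h⟩
                · exact h2D ⟨hc, h⟩),
              ih _ (le_trans (List.length_dropWhile_le _ _) hr) _]
            have hscan : icScan (c :: r) =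
                (c :: r.takeWhile icDigit) :: icScan (r.dropWhile icDigit) := by
              rw [icScan]
              simp [hd, h2d, h2D]
            rw [hscan]
            simp
      · by_cases hup : icUpper c = true
        · rw [icRun_cons, fresh_upper res c hup,
            run_upper r res [c] (by simp) (by simp [(upper_ne_23 c hup).1])
              (by simp [(upper_ne_23 c hup).2]),
            ih _ (le_trans (List.length_dropWhile_le _ _)
              (le_trans (List.length_dropWhile_le _ _) hr)) _]
          have hscan : icScan (c :: r) =
              (c :: (r.takeWhile icUpper ++ (r.dropWhile icUpper).takeWhile icLower)) ::
                icScan ((r.dropWhile icUpper).dropWhile icLower) := by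
            rw [icScan]
            simp [hd, hup]
          rw [hscan]
          simp
        · by_cases hlo : icLower c = true
          · rw [icRun_cons, fresh_lower res c hlo,
              run_lower r res [c] (by simp) (by simp [(lower_ne_23 c hlo).1])
                (by simp [(lower_ne_23 c hlo).2]),
              ih _ (le_trans (List.length_dropWhile_le _ _) hr) _]
            have hscan : icScan (c :: r) =
                (c :: r.takeWhile icLower) :: icScan (r.dropWhile icLower) := by
              rw [icScan]
              simp [hd, hup, hlo]
            rw [hscan]
            simp
          · rw [icRun_cons, fresh_other res c (by simp [hlo]) (by simp [hup]) (by simp [hd]), ih r hr res]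
            have hscan : icScan (c :: r) = icScan r := by
              rw [icScan]
              simp [hd, hup, hlo]
            rw [hscan]

-- ===== VERDICT (by name: the statement is the Claim_ definition above) =====
theorem InnercapSplit_spec : Claim_equal_InnercapSplit := by
  intro s _
  unfold Spec_InnercapSplit InnercapSplit InnercapSplit_alt
  have h := run_main s.toList.length s.toList le_rfl []
  unfold icRun at h
  rw [h]
  simp
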